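-- pv_equiv track=rewrite | github.com/jaaesung/petnose-adoption-platform | python-embed/app/embedding/dog_nose_identification2_embedder.py | _strip_prefix
-- ===== SOURCE A (Python) =====
-- def _strip_prefix(key: str) -> str:
--     changed = True
--     out = key
--     while changed:
--         changed = False
--         for prefix in ("module.", "model."):
--             if out.startswith(prefix):
--                 out = out[len(prefix):]
--                 changed = True
--     return out
-- ===== SOURCE B (Python) =====
-- import re
--
-- _PREFIX_RUN = re.compile(r'^(?:module\.|model\.)+')
--
-- def _strip_prefix(key: str) -> str:
--     return _PREFIX_RUN.sub('', key, count=1)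
-- ===== Notes on version B (the rewrite author's own statement) =====
-- stated objective: idiomatic
-- what changed: Replaces the while/for fixed-point loop with a flag and repeated slicing by a single anchored regex substitution that removes the maximal leading run of 'module.'/'model.' segments in one pass.
import Mathlib
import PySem

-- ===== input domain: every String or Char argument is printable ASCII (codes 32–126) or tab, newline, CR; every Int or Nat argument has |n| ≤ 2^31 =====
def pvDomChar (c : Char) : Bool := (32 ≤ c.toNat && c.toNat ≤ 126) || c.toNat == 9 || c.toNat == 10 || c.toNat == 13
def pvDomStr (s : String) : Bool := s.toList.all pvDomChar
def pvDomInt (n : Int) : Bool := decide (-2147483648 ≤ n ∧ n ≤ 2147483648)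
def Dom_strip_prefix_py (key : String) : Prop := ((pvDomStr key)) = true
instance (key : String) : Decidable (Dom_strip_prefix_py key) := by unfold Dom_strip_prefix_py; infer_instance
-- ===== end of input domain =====

-- B replaces A's flag-driven while/for stripping loop by one anchored regex substitution (idiomatic, same cost).

-- ===== PORT A =====
-- one pass of the `for prefix in ("module.", "model.")` body over state (out, changed := false)
def pvIterA (out : List Char) : List Char × Bool :=
  let s1 : List Char × Bool :=
    if PySem.Chars.startswith out "module.".toList then
      (PySem.List.slice out (some 7) none, true)
    else (out, false)
  if PySem.Chars.startswith s1.1 "model.".toList then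
    (PySem.List.slice s1.1 (some 6) none, true)
  else s1

-- a prefix match bounds the length from below (termination of both ports' loops)
theorem pvSwLen7 (l : List Char) (h : PySem.Chars.startswith l "module.".toList = true) :
    7 ≤ l.length := by
  have := ((PySem.Chars.startswith_iff _ _).mp h).length_le
  simpa using this

theorem pvSwLen6 (l : List Char) (h : PySem.Chars.startswith l "model.".toList = true) :
    6 ≤ l.length := by
  have := ((PySem.Chars.startswith_iff _ _).mp h).length_le
  simpa using this

-- the four possible outcomes of one pass, with slices rewritten to drops
theorem pvIterA_1 (out : List Char) (h1 : PySem.Chars.startswith out "module.".toList = true)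
    (h2 : PySem.Chars.startswith (out.drop 7) "model.".toList = true) :
    pvIterA out = ((out.drop 7).drop 6, true) := by
  have e7 : PySem.List.slice out (some 7) none = out.drop 7 := by simp [pysem]
  simp only [pvIterA, h1, if_true, e7, h2]
  simp [pysem]

theorem pvIterA_2 (out : List Char) (h1 : PySem.Chars.startswith out "module.".toList = true)
    (h2 : PySem.Chars.startswith (out.drop 7) "model.".toList = false) :
    pvIterA out = (out.drop 7, true) := by
  have e7 : PySem.List.slice out (some 7) none = out.drop 7 := by simp [pysem]
  simp only [pvIterA, h1, if_true, e7, h2]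
  simp

theorem pvIterA_3 (out : List Char) (h1 : PySem.Chars.startswith out "module.".toList = false)
    (h2 : PySem.Chars.startswith out "model.".toList = true) :
    pvIterA out = (out.drop 6, true) := by
  have e6 : PySem.List.slice out (some 6) none = out.drop 6 := by simp [pysem]
  simp only [pvIterA, h1, h2, Bool.false_eq_true, if_false, e6, if_true]

theorem pvIterA_4 (out : List Char) (h1 : PySem.Chars.startswith out "module.".toList = false)
    (h2 : PySem.Chars.startswith out "model.".toList = false) :
    pvIterA out = (out, false) := by
  simp only [pvIterA, h1, h2, Bool.false_eq_true, if_false]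

-- length decreases whenever the pass set changed := true (termination of the while loop)
theorem pvIterA_lt (out : List Char) (h : (pvIterA out).2 = true) :
    (pvIterA out).1.length < out.length := by
  by_cases h1 : PySem.Chars.startswith out "module.".toList
  · have h7 := pvSwLen7 out h1
    by_cases h2 : PySem.Chars.startswith (out.drop 7) "model.".toList
    · rw [pvIterA_1 out h1 h2]; simp; omega
    · rw [pvIterA_2 out h1 (by simpa using h2)]; simp; omega
  · by_cases h2 : PySem.Chars.startswith out "model.".toList
    · have h6 := pvSwLen6 out h2
      rw [pvIterA_3 out (by simpa using h1) h2]; simp; omega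
    · rw [pvIterA_4 out (by simpa using h1) (by simpa using h2)] at h
      simp at h

-- `while changed:` loop
def pvWhileA (out : List Char) : List Char :=
  let r := pvIterA out
  if h : r.2 = true then pvWhileA r.1 else r.1
termination_by out.length
decreasing_by exact pvIterA_lt out h

def strip_prefix_py (key : String) : String := String.ofList (pvWhileA key.toList)

-- ===== PORT B =====
-- exact port of the anchored regex sub r'^(?:module\.|model\.)+' → '': the regex engine consumes
-- leading 'module.'/'model.' segments greedily from the left; what remains is the result.
def pvRegexDrop (l : List Char) : List Char :=
  if h1 : PySem.Chars.startswith l "module.".toList then pvRegexDrop (l.drop 7)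
  else if h2 : PySem.Chars.startswith l "model.".toList then pvRegexDrop (l.drop 6)
  else l
termination_by l.length
decreasing_by
  · have h7 := pvSwLen7 l h1
    simp; omega
  · have h6 := pvSwLen6 l h2
    simp; omega

def strip_prefix_py_alt (key : String) : String := String.ofList (pvRegexDrop key.toList)

-- ===== PRECONDITION & SPEC =====
def Spec_strip_prefix_py (key : String) (out : String) : Prop := out = strip_prefix_py_alt key
instance (key : String) (out : String) : Decidable (Spec_strip_prefix_py key out) := by unfold Spec_strip_prefix_py; infer_instance

-- ===== CLAIM (what is proved, stated in full; the proofs are below) =====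
def Claim_equal_strip_prefix_py : Prop := ∀ (key : String), Dom_strip_prefix_py key → Spec_strip_prefix_py key (strip_prefix_py key)

-- ===== LEMMAS AND PROOFS =====
-- no list starts with both "module." and "model." (they differ at index 3)
theorem pvNotBoth (l : List Char)
    (h1 : PySem.Chars.startswith l "module.".toList = true)
    (h2 : PySem.Chars.startswith l "model.".toList = true) : False := by
  obtain ⟨t1, e1⟩ := (PySem.Chars.startswith_iff _ _).mp h1
  obtain ⟨t2, e2⟩ := (PySem.Chars.startswith_iff _ _).mp h2
  have : ("module.".toList ++ t1)[3]? = ("model.".toList ++ t2)[3]? := by rw [e1, e2]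
  simp at this

theorem pvRegexDrop_module (l : List Char)
    (h : PySem.Chars.startswith l "module.".toList = true) :
    pvRegexDrop l = pvRegexDrop (l.drop 7) := by
  rw [pvRegexDrop, dif_pos h]

theorem pvRegexDrop_model (l : List Char)
    (h : PySem.Chars.startswith l "model.".toList = true) :
    pvRegexDrop l = pvRegexDrop (l.drop 6) := by
  rw [pvRegexDrop, dif_neg (fun h1 => pvNotBoth l h1 h), dif_pos h]

theorem pvRegexDrop_none (l : List Char)
    (h1 : PySem.Chars.startswith l "module.".toList = false)
    (h2 : PySem.Chars.startswith l "model.".toList = false) :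
    pvRegexDrop l = l := by
  rw [pvRegexDrop,
      dif_neg (show ¬ PySem.Chars.startswith l "module.".toList = true from
        fun hh => Bool.noConfusion (h1.symm.trans hh)),
      dif_neg (show ¬ PySem.Chars.startswith l "model.".toList = true from
        fun hh => Bool.noConfusion (h2.symm.trans hh))]

-- main loop equivalence, by strong induction on the length
theorem pvWhileA_eq_pvRegexDrop (n : Nat) :
    ∀ l : List Char, l.length ≤ n → pvWhileA l = pvRegexDrop l := by
  induction n with
  | zero =>
    intro l hl
    have : l = [] := List.eq_nil_of_length_eq_zero (by omega)
    subst this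
    rw [pvWhileA, pvRegexDrop]; rfl
  | succ n ih =>
    intro l hl
    rw [pvWhileA]
    by_cases h1 : PySem.Chars.startswith l "module.".toList
    · have h7 := pvSwLen7 l h1
      rw [pvRegexDrop_module l h1]
      by_cases h2 : PySem.Chars.startswith (l.drop 7) "model.".toList
      · have h6 := pvSwLen6 _ h2
        rw [pvIterA_1 l h1 h2, pvRegexDrop_model _ h2]
        simp only [dif_pos]
        apply ih
        simp at h6 ⊢; omega
      · rw [pvIterA_2 l h1 (by simpa using h2)]
        simp only [dif_pos]
        apply ih
        simp; omega
    · by_cases h2 : PySem.Chars.startswith l "model.".toList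
      · have h6 := pvSwLen6 l h2
        rw [pvIterA_3 l (by simpa using h1) h2, pvRegexDrop_model l h2]
        simp only [dif_pos]
        apply ih
        simp; omega
      · rw [pvIterA_4 l (by simpa using h1) (by simpa using h2)]
        simp only [Bool.false_eq_true, dif_neg, not_false_iff]
        rw [pvRegexDrop_none l (by simpa using h1) (by simpa using h2)]

-- ===== VERDICT (by name: the statement is the Claim_ definition above) =====
theorem strip_prefix_py_spec : Claim_equal_strip_prefix_py := by
  intro key _
  unfold Spec_strip_prefix_py strip_prefix_py strip_prefix_py_alt
  rw [pvWhileA_eq_pvRegexDrop key.toList.length key.toList le_rfl]
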